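-- pv_equiv track=rewrite | github.com/Leewongi0731/DailyCodeTest | [프로그래머스 레벨2] JadenCase 문자열 만들기.py | solution
-- ===== SOURCE A (Python) =====
-- def solution(s):
--     answer = ''
--     for splitS in s.split(' '):
--         if splitS == '':
--             answer += " "
--         else:
--             addS = splitS[0].upper() + splitS[1:].lower()
--             answer += addS + ' '
--     return answer[:-1]
-- ===== SOURCE B (Python) =====
-- def solution(s):
--     out = []
--     start = True
--     for ch in s:
--         if ch == ' ':
--             out.append(' ')
--             start = True
--         elif start:
--             out.append(ch.upper())
--             start = False
--         else:
--             out.append(ch.lower())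
--     return ''.join(out)
-- ===== Notes on version B (the rewrite author's own statement) =====
-- stated objective: simpler
-- what changed: Replaced split-on-space / per-word slicing-and-rejoining (with trailing-character trimming) by a single character scan carrying a start-of-word flag, building the output in one pass with no trimming.
import Mathlib
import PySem

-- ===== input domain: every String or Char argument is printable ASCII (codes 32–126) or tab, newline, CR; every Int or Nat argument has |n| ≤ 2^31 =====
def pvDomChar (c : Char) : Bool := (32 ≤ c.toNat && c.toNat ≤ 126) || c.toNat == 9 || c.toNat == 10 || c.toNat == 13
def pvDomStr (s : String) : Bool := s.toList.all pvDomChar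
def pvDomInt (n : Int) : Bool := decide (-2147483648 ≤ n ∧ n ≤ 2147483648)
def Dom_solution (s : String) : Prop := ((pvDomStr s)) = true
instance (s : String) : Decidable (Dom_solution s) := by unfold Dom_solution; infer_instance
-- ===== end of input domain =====

-- B replaces A's split-on-space / per-word slice-and-rejoin (with final trim) by a single
-- character scan with a start-of-word flag; objective: simpler (same O(n) cost).

-- ===== PORT A =====
-- splitS[0].upper() + splitS[1:].lower(); A only applies it to nonempty splitS,
-- where the c :: rest pattern is exactly [0] and [1:].
def capA : List Char → List Char
  | [] => []
  | c :: rest => PySem.Chars.upperChar c :: PySem.Chars.lower rest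

def solution (s : String) : String :=
  let answer := (PySem.Chars.splitOn s.toList [' ']).foldl
    (fun answer splitS =>
      if splitS = [] then answer ++ [' ']
      else answer ++ capA splitS ++ [' '])
    ([] : List Char)
  String.mk (PySem.List.slice answer none (some (-1)))

-- ===== PORT B =====
def solution_alt (s : String) : String :=
  String.mk
    (s.toList.foldl
      (fun (p : List Char × Bool) ch =>
        if ch = ' ' then (p.1 ++ [' '], true)
        else if p.2 then (p.1 ++ [PySem.Chars.upperChar ch], false)
        else (p.1 ++ [PySem.Chars.lowerChar ch], false))
      (([] : List Char), true)).1

-- ===== PRECONDITION & SPEC =====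
def Spec_solution (s : String) (out : String) : Prop := out = solution_alt s
instance (s : String) (out : String) : Decidable (Spec_solution s out) := by unfold Spec_solution; infer_instance

-- ===== CLAIM (what is proved, stated in full; the proofs are below) =====
def Claim_equal_solution : Prop := ∀ (s : String), Dom_solution s → Spec_solution s (solution s)

-- ===== LEMMAS AND PROOFS =====

-- common specification: the JadenCase transform of the remaining characters,
-- the Bool saying whether we are at the start of a word
def gSpec : Bool → List Char → List Char
  | _, [] => []
  | b, c :: t =>
    if c = ' ' then ' ' :: gSpec true t
    else (if b then PySem.Chars.upperChar c else PySem.Chars.lowerChar c) :: gSpec false t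

theorem capA_nil : capA [] = [] := rfl

-- clean structural form of splitting on a single space (cur = reversed current piece)
def spl : List Char → List Char → List (List Char)
  | cur, [] => [cur.reverse]
  | cur, c :: rest => if c = ' ' then cur.reverse :: spl [] rest else spl (c :: cur) rest

theorem splitOn_go_eq (l : List Char) : ∀ (fuel : Nat) (cur : List Char) (acc : List (List Char)),
    l.length < fuel →
    PySem.Chars.splitOn.go [' '] fuel l cur acc = acc.reverse ++ spl cur l := by
  induction l with
  | nil =>
    intro fuel cur acc h
    cases fuel with
    | zero => omega
    | succ f => simp [PySem.Chars.splitOn.go, spl]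
  | cons c rest ih =>
    intro fuel cur acc h
    cases fuel with
    | zero => simp at h
    | succ f =>
      by_cases hc : c = ' '
      · subst hc
        simp only [PySem.Chars.splitOn.go, List.isPrefixOf, BEq.rfl, Bool.and_self,
          if_true]
        simp only [List.length_cons, List.length_nil, List.drop_succ_cons, List.drop_zero]
        rw [ih f [] (cur.reverse :: acc) (by simp at h; omega)]
        simp [spl]
      · have hpre : [' '].isPrefixOf (c :: rest) = false := by
          simp [List.isPrefixOf]; exact fun hh => absurd hh.symm hc
        simp only [PySem.Chars.splitOn.go, hpre, Bool.false_eq_true, if_false]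
        rw [ih f (c :: cur) acc (by simp at h ⊢; omega)]
        simp [spl, hc]

theorem splitOn_eq_spl (l : List Char) :
    PySem.Chars.splitOn l [' '] = spl [] l := by
  show PySem.Chars.splitOn.go [' '] (l.length + 1) l [] [] = spl [] l
  rw [splitOn_go_eq l (l.length + 1) [] [] (by omega)]
  rfl

theorem foldA_eq (ps : List (List Char)) : ∀ (acc : List Char),
    ps.foldl (fun a p => if p = [] then a ++ [' '] else a ++ capA p ++ [' ']) acc
      = acc ++ (ps.map (fun p => capA p ++ [' '])).flatten := by
  induction ps with
  | nil => intro acc; simp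
  | cons p t ih =>
    intro acc
    have hstep : (if p = [] then acc ++ [' '] else acc ++ capA p ++ [' '])
        = acc ++ (capA p ++ [' ']) := by
      by_cases hp : p = [] <;> simp [hp, capA]
    rw [List.foldl_cons, hstep, ih]
    simp

theorem capA_append_singleton (xs : List Char) (c : Char) :
    capA (xs ++ [c]) =
      if xs = [] then [PySem.Chars.upperChar c] else capA xs ++ [PySem.Chars.lowerChar c] := by
  cases xs with
  | nil => simp [capA, PySem.Chars.lower]
  | cons x r => simp [capA, PySem.Chars.lower]

theorem spl_flatten_eq (l : List Char) : ∀ (cur : List Char),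
    ((spl cur l).map (fun p => capA p ++ [' '])).flatten
      = (if cur = [] then gSpec true l else capA cur.reverse ++ gSpec false l) ++ [' '] := by
  induction l with
  | nil =>
    intro cur
    by_cases hcur : cur = [] <;> simp [spl, gSpec, hcur, capA_nil]
  | cons c t ih =>
    intro cur
    by_cases hc : c = ' '
    · subst hc
      simp only [spl, if_true, List.map_cons, List.flatten_cons, ih []]
      by_cases hcur : cur = [] <;> simp [gSpec, hcur, capA_nil]
    · simp only [spl, hc, if_false, ih (c :: cur), List.reverse_cons, capA_append_singleton,
        List.reverse_eq_nil_iff]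
      by_cases hcur : cur = [] <;> simp [gSpec, hc, hcur]

theorem solution_eq_gSpec (s : String) :
    solution s = String.mk (gSpec true s.toList) := by
  unfold solution
  rw [splitOn_eq_spl, foldA_eq, spl_flatten_eq]
  simp [PySem.List.slice_to_neg_one]

theorem foldB_eq (l : List Char) : ∀ (acc : List Char) (b : Bool),
    (l.foldl
      (fun (p : List Char × Bool) ch =>
        if ch = ' ' then (p.1 ++ [' '], true)
        else if p.2 then (p.1 ++ [PySem.Chars.upperChar ch], false)
        else (p.1 ++ [PySem.Chars.lowerChar ch], false))
      (acc, b)).1 = acc ++ gSpec b l := by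
  induction l with
  | nil => intro acc b; simp [gSpec]
  | cons c t ih =>
    intro acc b
    by_cases hc : c = ' '
    · subst hc; simp [List.foldl_cons, ih, gSpec]
    · cases b <;> simp [List.foldl_cons, hc, ih, gSpec]

theorem solution_alt_eq_gSpec (s : String) :
    solution_alt s = String.mk (gSpec true s.toList) := by
  unfold solution_alt
  rw [foldB_eq]
  rfl

-- ===== VERDICT (by name: the statement is the Claim_ definition above) =====
theorem solution_spec : Claim_equal_solution := by
  intro s _
  show solution s = solution_alt s
  rw [solution_eq_gSpec, solution_alt_eq_gSpec]
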